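-- pv_equiv track=rewrite | github.com/anoop355/leak-detection-in-water-distribution-networks | evaluate_tcnmodels.py | match_pipes_only
-- ===== SOURCE A (Python) =====
-- from typing import List, Dict, Tuple, Optional
--
-- def safe_int(x, default=-1):
--     try:
--         return int(x)
--     except Exception:
--         return int(default)
--
-- def match_pipes_only(true_leaks: List[Dict], pred_leaks: List[Dict]) -> Tuple[int, int, int]:
--     true_pipes = [safe_int(l.get("pipe_id", -1)) for l in true_leaks]
--     pred_pipes = [safe_int(l.get("pipe_id", -1)) for l in pred_leaks]
--
--     TP = 0
--     used = set()
--     for tp in sorted(true_pipes):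
--         for j, pp in enumerate(pred_pipes):
--             if j in used:
--                 continue
--             if pp == tp:
--                 TP += 1
--                 used.add(j)
--                 break
--
--     FP = len(pred_pipes) - TP
--     FN = len(true_pipes) - TP
--     return TP, FP, FN
-- ===== SOURCE B (Python) =====
-- from typing import List, Dict, Tuple
--
-- def safe_int(x, default=-1):
--     try:
--         return int(x)
--     except Exception:
--         return int(default)
--
-- def match_pipes_only(true_leaks: List[Dict], pred_leaks: List[Dict]) -> Tuple[int, int, int]:
--     true_pipes = [safe_int(l.get("pipe_id", -1)) for l in true_leaks]
--     pred_pipes = [safe_int(l.get("pipe_id", -1)) for l in pred_leaks]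
--
--     remaining = {}
--     for p in pred_pipes:
--         remaining[p] = remaining.get(p, 0) + 1
--
--     TP = 0
--     for t in true_pipes:
--         c = remaining.get(t, 0)
--         if c > 0:
--             TP += 1
--             remaining[t] = c - 1
--
--     return TP, len(pred_pipes) - TP, len(true_pipes) - TP
-- ===== Notes on version B (the rewrite author's own statement) =====
-- stated objective: alternative
-- what changed: A sorts the true pipe ids and, for each, rescans the whole pred list skipping a set of used indices; B builds one counting dict over pred and does a single decrementing pass over true (no sort, no inner scan, no index set).
import Mathlib
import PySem

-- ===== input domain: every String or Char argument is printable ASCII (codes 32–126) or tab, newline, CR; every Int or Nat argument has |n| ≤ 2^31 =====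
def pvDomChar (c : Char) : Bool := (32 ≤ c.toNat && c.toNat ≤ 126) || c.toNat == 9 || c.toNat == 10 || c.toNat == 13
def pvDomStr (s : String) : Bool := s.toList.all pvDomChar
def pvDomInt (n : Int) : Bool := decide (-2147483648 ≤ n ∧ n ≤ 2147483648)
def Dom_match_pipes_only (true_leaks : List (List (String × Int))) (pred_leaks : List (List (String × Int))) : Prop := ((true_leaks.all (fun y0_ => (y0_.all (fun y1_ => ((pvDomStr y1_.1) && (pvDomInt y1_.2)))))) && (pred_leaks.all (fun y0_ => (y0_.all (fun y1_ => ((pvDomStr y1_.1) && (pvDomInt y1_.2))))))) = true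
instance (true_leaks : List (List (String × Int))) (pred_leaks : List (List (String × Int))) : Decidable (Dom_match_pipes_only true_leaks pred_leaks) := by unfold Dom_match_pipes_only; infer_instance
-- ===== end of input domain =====

-- B replaces A's sort of true plus per-true-element rescan of pred (with a used-index set)
-- by one counting dict built over pred and a single decrementing pass over true (alternative algorithm).
-- NOTE: the dict values here are ints, so safe_int(l.get("pipe_id", -1)) = l.get("pipe_id", -1);
-- both Pythons share this helper and so do the ports (pvPipeId).

-- ===== PORT A =====
-- safe_int(l.get("pipe_id", -1)): int(x) on an int is x, and the default is the int -1
def pvPipeId (l : List (String × Int)) : Int :=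
  PySem.Dict.getD (PySem.Dict.mk l) "pipe_id" (-1)

-- A's inner 'for j, pp in enumerate(pred_pipes): if j in used: continue; if pp == tp: … break'
def pvFind (tp : Int) : List (Int × Int) → PySem.Set Int → Option Int
  | [], _ => none
  | (j, pp) :: rest, used =>
    if PySem.Set.contains used j then pvFind tp rest used
    else if pp == tp then some j
    else pvFind tp rest used

def match_pipes_only (true_leaks : List (List (String × Int))) (pred_leaks : List (List (String × Int))) : Int × Int × Int :=
  let true_pipes := true_leaks.map pvPipeId
  let pred_pipes := pred_leaks.map pvPipeId
  let pairs := PySem.List.enumerate pred_pipes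
  let st := (PySem.List.sorted true_pipes (fun x => x) false).foldl
    (fun (s : Int × PySem.Set Int) tp =>
      match pvFind tp pairs s.2 with
      | some j => (s.1 + 1, PySem.Set.add s.2 j)
      | none => s) (0, PySem.Set.empty)
  (st.1, (pred_pipes.length : Int) - st.1, (true_pipes.length : Int) - st.1)

-- ===== PORT B =====
def match_pipes_only_alt (true_leaks : List (List (String × Int))) (pred_leaks : List (List (String × Int))) : Int × Int × Int :=
  let true_pipes := true_leaks.map pvPipeId
  let pred_pipes := pred_leaks.map pvPipeId
  let remaining := pred_pipes.foldl
    (fun (d : PySem.Dict Int Int) p => d.insert p (d.getD p 0 + 1)) PySem.Dict.empty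
  let st := true_pipes.foldl
    (fun (s : Int × PySem.Dict Int Int) t =>
      let c := s.2.getD t 0
      if c > 0 then (s.1 + 1, s.2.insert t (c - 1)) else s) (0, remaining)
  (st.1, (pred_pipes.length : Int) - st.1, (true_pipes.length : Int) - st.1)

-- ===== PRECONDITION & SPEC =====
def Spec_match_pipes_only (true_leaks : List (List (String × Int))) (pred_leaks : List (List (String × Int))) (out : Int × Int × Int) : Prop := out = match_pipes_only_alt true_leaks pred_leaks
instance (true_leaks : List (List (String × Int))) (pred_leaks : List (List (String × Int))) (out : Int × Int × Int) : Decidable (Spec_match_pipes_only true_leaks pred_leaks out) := by unfold Spec_match_pipes_only; infer_instance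

-- ===== CLAIM (what is proved, stated in full; the proofs are below) =====
def Claim_equal_match_pipes_only : Prop := ∀ (true_leaks : List (List (String × Int))) (pred_leaks : List (List (String × Int))), Dom_match_pipes_only true_leaks pred_leaks → Spec_match_pipes_only true_leaks pred_leaks (match_pipes_only true_leaks pred_leaks)

-- ===== LEMMAS AND PROOFS =====

-- greedy match count of a list of wanted values against a multiset of available values
def pvMC : List Int → Multiset Int → Nat
  | [], _ => 0
  | t :: ts, m => if t ∈ m then pvMC ts (m.erase t) + 1 else pvMC ts m

theorem pvMC_swap (a b : Int) (l : List Int) (m : Multiset Int) :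
    pvMC (a :: b :: l) m = pvMC (b :: a :: l) m := by
  by_cases hab : a = b
  · subst hab; rfl
  · have hba : b ≠ a := fun h => hab h.symm
    by_cases ha : a ∈ m <;> by_cases hb : b ∈ m
    · simp only [pvMC, if_pos ha, if_pos hb,
        if_pos ((Multiset.mem_erase_of_ne hba).mpr hb),
        if_pos ((Multiset.mem_erase_of_ne hab).mpr ha),
        Multiset.erase_comm]
    · have hb' : b ∉ m.erase a := fun h => hb (Multiset.mem_of_mem_erase h)
      simp [pvMC, ha, hb, hb']
    · have ha' : a ∉ m.erase b := fun h => ha (Multiset.mem_of_mem_erase h)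
      simp [pvMC, ha, hb, ha']
    · simp [pvMC, ha, hb]

theorem pvMC_perm {l l' : List Int} (h : l.Perm l') : ∀ m : Multiset Int, pvMC l m = pvMC l' m := by
  induction h with
  | nil => intro m; rfl
  | cons x _ ih =>
    intro m; simp only [pvMC]
    by_cases hx : x ∈ m <;> simp [hx, ih]
  | swap a b l => intro m; exact (pvMC_swap a b l m).symm
  | trans _ _ ih1 ih2 => intro m; rw [ih1, ih2]

-- remaining pred values at indices not yet used
def pvRem (pairs : List (Int × Int)) (used : PySem.Set Int) : Multiset Int :=
  ↑((pairs.filter (fun p => !(PySem.Set.contains used p.1))).map Prod.snd)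

theorem pvContains_add (s : PySem.Set Int) (x y : Int) :
    PySem.Set.contains (PySem.Set.add s x) y = (PySem.Set.contains s y || y == x) := by
  simp only [PySem.Set.add, PySem.Set.contains]
  split_ifs with h
  · by_cases hyx : y = x
    · subst hyx; simp_all
    · simp [hyx]
  · by_cases hyx : y = x <;> simp [hyx]

theorem pvRem_cons_used (k pp : Int) (rest : List (Int × Int)) (used : PySem.Set Int)
    (hc : PySem.Set.contains used k = true) :
    pvRem ((k, pp) :: rest) used = pvRem rest used := by
  unfold pvRem
  rw [List.filter_cons, show (!(PySem.Set.contains used k)) = false by rw [hc]; rfl]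
  rfl

theorem pvRem_cons_free (k pp : Int) (rest : List (Int × Int)) (used : PySem.Set Int)
    (hc : PySem.Set.contains used k = false) :
    pvRem ((k, pp) :: rest) used = pp ::ₘ pvRem rest used := by
  unfold pvRem
  rw [List.filter_cons, show (!(PySem.Set.contains used k)) = true by rw [hc]; rfl]
  rfl

theorem pvFind_none (tp : Int) : ∀ (pairs : List (Int × Int)) (used : PySem.Set Int),
    pvFind tp pairs used = none ↔ tp ∉ pvRem pairs used := by
  intro pairs
  induction pairs with
  | nil => intro used; simp [pvFind, pvRem]
  | cons p rest ih =>
    intro used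
    obtain ⟨j, pp⟩ := p
    by_cases hc : PySem.Set.contains used j
    · rw [pvFind, if_pos hc, pvRem_cons_used j pp rest used hc]
      exact ih used
    · have hc' : PySem.Set.contains used j = false := by simpa using hc
      rw [pvFind, if_neg hc, pvRem_cons_free j pp rest used hc']
      by_cases hpp : pp = tp
      · rw [if_pos (by simp [hpp])]
        simp [hpp]
      · rw [if_neg (by simp [hpp]), ih used]
        simp [Multiset.mem_cons, Ne.symm hpp]

theorem pvFind_some (tp : Int) : ∀ (pairs : List (Int × Int)) (used : PySem.Set Int) (j : Int),
    pvFind tp pairs used = some j →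
    j ∈ pairs.map Prod.fst ∧ PySem.Set.contains used j = false := by
  intro pairs
  induction pairs with
  | nil => intro used j h; simp [pvFind] at h
  | cons p rest ih =>
    intro used j h
    obtain ⟨k, pp⟩ := p
    by_cases hc : PySem.Set.contains used k
    · rw [pvFind, if_pos hc] at h
      obtain ⟨h1, h2⟩ := ih used j h
      exact ⟨by simp [h1], h2⟩
    · by_cases hpp : pp = tp
      · rw [pvFind, if_neg hc, if_pos (by simp [hpp])] at h
        obtain rfl : k = j := by simpa using h
        exact ⟨by simp, by simpa using hc⟩
      · rw [pvFind, if_neg hc, if_neg (by simp [hpp])] at h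
        obtain ⟨h1, h2⟩ := ih used j h
        exact ⟨by simp [h1], h2⟩

theorem pvRem_add_notmem : ∀ (pairs : List (Int × Int)) (used : PySem.Set Int) (j : Int),
    j ∉ pairs.map Prod.fst → pvRem pairs (PySem.Set.add used j) = pvRem pairs used := by
  intro pairs
  induction pairs with
  | nil => intro used j _; rfl
  | cons p rest ih =>
    intro used j hj
    obtain ⟨k, pp⟩ := p
    simp only [List.map_cons, List.mem_cons, not_or] at hj
    have hkj : k ≠ j := fun h => hj.1 h.symm
    have hrest : j ∉ rest.map Prod.fst := hj.2
    have hcont : PySem.Set.contains (PySem.Set.add used j) k = PySem.Set.contains used k := by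
      rw [pvContains_add]
      simp [hkj]
    by_cases hc : PySem.Set.contains used k
    · rw [pvRem_cons_used k pp rest _ (hcont.trans hc), pvRem_cons_used k pp rest used hc]
      exact ih used j hrest
    · have hc' : PySem.Set.contains used k = false := by simpa using hc
      rw [pvRem_cons_free k pp rest _ (hcont.trans hc'), pvRem_cons_free k pp rest used hc',
        ih used j hrest]

theorem pvRem_find (tp : Int) : ∀ (pairs : List (Int × Int)) (used : PySem.Set Int) (j : Int),
    (pairs.map Prod.fst).Nodup → pvFind tp pairs used = some j →
    pvRem pairs (PySem.Set.add used j) = (pvRem pairs used).erase tp := by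
  intro pairs
  induction pairs with
  | nil => intro used j _ h; simp [pvFind] at h
  | cons p rest ih =>
    intro used j hnd h
    obtain ⟨k, pp⟩ := p
    have hndr : (rest.map Prod.fst).Nodup := by
      simp only [List.map_cons, List.nodup_cons] at hnd; exact hnd.2
    have hknr : k ∉ rest.map Prod.fst := by
      simp only [List.map_cons, List.nodup_cons] at hnd; exact hnd.1
    by_cases hc : PySem.Set.contains used k
    · rw [pvFind, if_pos hc] at h
      have hck : PySem.Set.contains (PySem.Set.add used j) k = true := by
        rw [pvContains_add, hc]; simp
      rw [pvRem_cons_used k pp rest _ hck, pvRem_cons_used k pp rest used hc]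
      exact ih used j hndr h
    · have hc' : PySem.Set.contains used k = false := by simpa using hc
      by_cases hpp : pp = tp
      · rw [pvFind, if_neg hc, if_pos (by simp [hpp])] at h
        obtain rfl : k = j := by simpa using h
        have hck : PySem.Set.contains (PySem.Set.add used k) k = true := by
          rw [pvContains_add]; simp
        rw [pvRem_cons_used k pp rest _ hck, pvRem_cons_free k pp rest used hc',
          pvRem_add_notmem rest used k hknr, hpp, Multiset.erase_cons_head]
      · rw [pvFind, if_neg hc, if_neg (by simp [hpp])] at h
        have hjr : j ∈ rest.map Prod.fst := (pvFind_some tp rest used j h).1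
        have hkj : k ≠ j := fun he => hknr (he ▸ hjr)
        have hck : PySem.Set.contains (PySem.Set.add used j) k = false := by
          rw [pvContains_add, hc']
          simp [hkj]
        rw [pvRem_cons_free k pp rest _ hck, pvRem_cons_free k pp rest used hc',
          ih used j hndr h, Multiset.erase_cons_tail]
        exact fun he => hpp (by simpa using he)

theorem pvA_loop (pairs : List (Int × Int)) (hnd : (pairs.map Prod.fst).Nodup) :
    ∀ (ts : List Int) (t0 : Int) (used : PySem.Set Int),
    (ts.foldl (fun (s : Int × PySem.Set Int) tp =>
      match pvFind tp pairs s.2 with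
      | some j => (s.1 + 1, PySem.Set.add s.2 j)
      | none => s) (t0, used)).1 = t0 + (pvMC ts (pvRem pairs used) : Int) := by
  intro ts
  induction ts with
  | nil => intro t0 used; simp [pvMC]
  | cons t ts ih =>
    intro t0 used
    rw [List.foldl_cons]
    cases h : pvFind t pairs used with
    | none =>
      have hmem := (pvFind_none t pairs used).mp h
      simp only [ih, pvMC, if_neg hmem]
    | some j =>
      have hmem : t ∈ pvRem pairs used := by
        by_contra hm
        rw [← pvFind_none t pairs used] at hm
        simp [h] at hm
      simp only [ih, pvRem_find t pairs used j hnd h, pvMC, if_pos hmem]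
      push_cast
      ring

def pvRepr (d : PySem.Dict Int Int) (m : Multiset Int) : Prop :=
  ∀ v : Int, d.getD v 0 = (m.count v : Int)

theorem pvB_build : ∀ (xs : List Int) (d : PySem.Dict Int Int) (m : Multiset Int), pvRepr d m →
    pvRepr (xs.foldl (fun (d : PySem.Dict Int Int) p => d.insert p (d.getD p 0 + 1)) d) (m + ↑xs) := by
  intro xs
  induction xs with
  | nil => intro d m h; simpa using h
  | cons x xs ih =>
    intro d m h
    rw [List.foldl_cons]
    have h' : pvRepr (d.insert x (d.getD x 0 + 1)) (m + {x}) := by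
      intro v
      rw [PySem.Dict.getD_insert]
      by_cases hv : v = x
      · subst hv; rw [if_pos rfl, h v]; simp
      · rw [if_neg hv, h v]; simp [hv]
    have := ih _ _ h'
    have heq : (m + {x}) + (↑xs : Multiset Int) = m + ↑(x :: xs) := by
      rw [add_assoc, Multiset.singleton_add, Multiset.cons_coe]
    rwa [heq] at this

theorem pvB_loop : ∀ (ts : List Int) (t0 : Int) (d : PySem.Dict Int Int) (m : Multiset Int), pvRepr d m →
    (ts.foldl (fun (s : Int × PySem.Dict Int Int) t =>
      let c := s.2.getD t 0
      if c > 0 then (s.1 + 1, s.2.insert t (c - 1)) else s) (t0, d)).1 = t0 + (pvMC ts m : Int) := by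
  intro ts
  induction ts with
  | nil => intro t0 d m h; simp [pvMC]
  | cons t ts ih =>
    intro t0 d m h
    rw [List.foldl_cons]
    by_cases hmem : t ∈ m
    · have hc : d.getD t 0 > 0 := by rw [h t]; exact_mod_cast Multiset.count_pos.mpr hmem
      have h' : pvRepr (d.insert t (d.getD t 0 - 1)) (m.erase t) := by
        intro v
        rw [PySem.Dict.getD_insert]
        by_cases hv : v = t
        · subst hv
          rw [if_pos rfl, h v, Multiset.count_erase_self]
          have : 1 ≤ m.count v := Multiset.count_pos.mpr hmem
          push_cast [this]
          ring
        · rw [if_neg hv, h v, Multiset.count_erase_of_ne hv]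
      simp only [hc, if_pos, ih _ _ _ h', pvMC, if_pos hmem]
      push_cast
      ring
    · have hc : ¬(d.getD t 0 > 0) := by
        rw [h t, Multiset.count_eq_zero.mpr hmem]
        simp
      rw [if_neg hc, ih _ _ _ h]
      simp only [pvMC, if_neg hmem]

-- ===== VERDICT (by name: the statement is the Claim_ definition above) =====
theorem match_pipes_only_spec : Claim_equal_match_pipes_only := by
  unfold Claim_equal_match_pipes_only Spec_match_pipes_only
  intro tl pl _
  have hnd : ((PySem.List.enumerate (pl.map pvPipeId)).map Prod.fst).Nodup :=
    (List.pairwise_map).mpr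
      ((PySem.List.pairwise_lt_enumerate (pl.map pvPipeId) 0).imp fun h => ne_of_lt h)
  have hrem : pvRem (PySem.List.enumerate (pl.map pvPipeId)) PySem.Set.empty
      = (↑(pl.map pvPipeId) : Multiset Int) := by
    unfold pvRem
    rw [List.filter_eq_self.mpr (fun a _ => by simp [PySem.Set.contains, PySem.Set.empty]),
      PySem.List.map_snd_enumerate]
  have hB0 : pvRepr PySem.Dict.empty (0 : Multiset Int) := by
    intro v
    simp [PySem.Dict.getD, PySem.Dict.get?, PySem.Dict.empty]
  have hBr : pvRepr ((pl.map pvPipeId).foldl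
      (fun (d : PySem.Dict Int Int) p => d.insert p (d.getD p 0 + 1)) PySem.Dict.empty)
      (↑(pl.map pvPipeId)) := by
    have := pvB_build (pl.map pvPipeId) PySem.Dict.empty 0 hB0
    simpa using this
  have hA := pvA_loop (PySem.List.enumerate (pl.map pvPipeId)) hnd
      (PySem.List.sorted (tl.map pvPipeId) (fun x => x) false) 0 PySem.Set.empty
  have hB := pvB_loop (tl.map pvPipeId) 0 _ _ hBr
  rw [hrem, pvMC_perm (PySem.List.sorted_perm (tl.map pvPipeId) (fun x => x) false)] at hA
  simp only [match_pipes_only, match_pipes_only_alt]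
  rw [hA, hB]
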